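-- pv_equiv track=rewrite | github.com/weichuliao/Leetcode | problems/amazon-searchword.py | solution
-- ===== SOURCE A (Python) =====
-- def solution(search: str, result: str) -> int:
--     ptrs = ptrr = 0
--     ans = ''
--     while ptrs < len(search) or ptrr < len(result):
--         if ptrs >= len(search):
--             break
--         if ptrr >= len(result):
--             break
--         if search[ptrs] == result[ptrr]:
--             ptrs += 1
--             ptrr += 1
--         else: ptrs += 1
--     return abs((len(search) - ptrs) - (len(result) - ptrr))
-- ===== SOURCE B (Python) =====
-- def solution(search: str, result: str) -> int:
--     # Occurrence-index approach: one pass builds, per character, the sorted list of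
--     # its positions in `search`; then each character of `result` is matched by a
--     # hand-written binary search for the first occurrence at or after `cur`,
--     # instead of A's linear two-pointer scan over `search`.
--     pos = {}
--     for i, c in enumerate(search):
--         pos.setdefault(c, []).append(i)
--     cur = matched = 0
--     for ch in result:
--         lst = pos.get(ch, [])
--         lo, hi = 0, len(lst)
--         while lo < hi:
--             mid = (lo + hi) // 2
--             if lst[mid] < cur:
--                 lo = mid + 1
--             else:
--                 hi = mid
--         if lo == len(lst):
--             cur = len(search)
--             break
--         cur = lst[lo] + 1
--         matched += 1
--     return abs((len(search) - cur) - (len(result) - matched))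
-- ===== Notes on version B (the rewrite author's own statement) =====
-- stated objective: alternative
-- what changed: A is a linear two-pointer greedy scan over search; B first builds a per-character occurrence index (one dict pass over search) and then, for each character of result, finds its next occurrence with a hand-written binary search over that character's position list.
import Mathlib
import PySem

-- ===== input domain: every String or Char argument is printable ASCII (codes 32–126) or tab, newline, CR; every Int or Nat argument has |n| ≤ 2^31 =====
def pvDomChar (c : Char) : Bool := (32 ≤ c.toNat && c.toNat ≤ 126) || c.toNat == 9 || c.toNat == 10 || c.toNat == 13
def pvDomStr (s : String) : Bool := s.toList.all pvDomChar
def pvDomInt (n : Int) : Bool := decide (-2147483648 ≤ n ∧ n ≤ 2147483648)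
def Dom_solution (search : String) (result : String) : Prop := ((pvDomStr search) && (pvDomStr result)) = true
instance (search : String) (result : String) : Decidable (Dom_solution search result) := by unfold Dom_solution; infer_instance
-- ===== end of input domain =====

-- B replaces A's linear two-pointer greedy scan by a per-character occurrence index
-- plus binary search; same value on every input (objective: alternative, not faster).

-- ===== PORT A =====
-- A's while loop: two pointers ptrs/ptrr, ptrs advances every iteration.
def solutionLoop (s r : List Char) (ptrs ptrr : Nat) : Nat × Nat :=
  if ptrs < s.length ∨ ptrr < r.length then
    if ptrs ≥ s.length then (ptrs, ptrr)
    else if ptrr ≥ r.length then (ptrs, ptrr)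
    else if s[ptrs]? = r[ptrr]? then solutionLoop s r (ptrs + 1) (ptrr + 1)
    else solutionLoop s r (ptrs + 1) ptrr
  else (ptrs, ptrr)
termination_by s.length - ptrs

def solution (search : String) (result : String) : Int :=
  let s := search.toList
  let r := result.toList
  let p := solutionLoop s r 0 0
  |((s.length : Int) - (p.1 : Int)) - ((r.length : Int) - (p.2 : Int))|

-- ===== PORT B =====
-- Source B's first loop: pos.setdefault(c, []).append(i) over enumerate(search).
def buildPos : List (Int × Char) → PySem.Dict Char (List Int) → PySem.Dict Char (List Int)
  | [], d => d
  | (i, c) :: t, d => buildPos t (d.modify c [] (fun l => l ++ [i]))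

-- Source B's hand-written while loop (binary search); lst[mid] is always in range
-- (mid < hi ≤ len lst), so getD's default is never read.
def bsearch (lst : List Int) (cur : Int) (lo hi : Nat) : Nat :=
  if lo < hi then
    -- mid = (lo + hi) // 2 (inlined)
    if lst.getD ((lo + hi) / 2) 0 < cur then bsearch lst cur ((lo + hi) / 2 + 1) hi
    else bsearch lst cur lo ((lo + hi) / 2)
  else lo
termination_by hi - lo
decreasing_by all_goals omega

-- Source B's for-loop over result; returns (cur, matched).
def altLoop (slen : Int) (pos : PySem.Dict Char (List Int)) :
    List Char → Int → Int → Int × Int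
  | [], cur, matched => (cur, matched)
  | ch :: rs, cur, matched =>
    let lst := pos.getD ch []
    let lo := bsearch lst cur 0 lst.length
    if lo = lst.length then (slen, matched)
    else altLoop slen pos rs (lst.getD lo 0 + 1) (matched + 1)

def solution_alt (search : String) (result : String) : Int :=
  let s := search.toList
  let r := result.toList
  let pos := buildPos (PySem.List.enumerate s 0) PySem.Dict.empty
  let p := altLoop (s.length : Int) pos r 0 0
  |((s.length : Int) - p.1) - ((r.length : Int) - p.2)|

-- ===== PRECONDITION & SPEC =====
def Spec_solution (search : String) (result : String) (out : Int) : Prop := out = solution_alt search result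
instance (search : String) (result : String) (out : Int) : Decidable (Spec_solution search result out) := by unfold Spec_solution; infer_instance

-- ===== CLAIM =====
def Claim_equal_solution : Prop := ∀ (search : String) (result : String), Dom_solution search result → Spec_solution search result (solution search result)

-- ===== LEMMAS AND PROOFS =====

-- The ascending list of positions (starting offset i) of c in s.
def occFrom : List Char → Int → Char → List Int
  | [], _, _ => []
  | x :: xs, i, c => if x = c then i :: occFrom xs (i + 1) c else occFrom xs (i + 1) c

-- The least index j ≥ i with s[j] = c (A's linear scan, as a function).
def firstIdxFrom (s : List Char) (i : Nat) (c : Char) : Option Nat :=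
  if h : i < s.length then
    (if s[i] = c then some i else firstIdxFrom s (i + 1) c)
  else none
termination_by s.length - i

theorem buildPos_getD (s : List Char) : ∀ (i : Int) (d : PySem.Dict Char (List Int)) (c : Char),
    (buildPos (PySem.List.enumerate s i) d).getD c [] = d.getD c [] ++ occFrom s i c := by
  induction s with
  | nil => intro i d c; simp [PySem.List.enumerate_nil, buildPos, occFrom]
  | cons x xs ih =>
    intro i d c
    rw [PySem.List.enumerate_cons]
    show (buildPos (PySem.List.enumerate xs (i + 1)) (d.modify x [] (fun l => l ++ [i]))).getD c []
        = d.getD c [] ++ occFrom (x :: xs) i c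
    rw [ih]
    by_cases hc : x = c
    · subst hc
      rw [PySem.Dict.getD_modify_self]
      simp [occFrom, List.append_assoc]
    · rw [PySem.Dict.getD_modify_of_ne _ _ _ (fun h => hc h.symm)]
      simp [occFrom, hc]

theorem mem_occFrom (s : List Char) : ∀ (i : Int) (c : Char) (y : Int),
    y ∈ occFrom s i c ↔ ∃ k : Nat, s[k]? = some c ∧ y = i + k := by
  induction s with
  | nil => intro i c y; simp [occFrom]
  | cons x xs ih =>
    intro i c y
    by_cases hc : x = c
    · rw [show occFrom (x :: xs) i c = i :: occFrom xs (i + 1) c by simp [occFrom, hc]]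
      simp only [List.mem_cons, ih]
      constructor
      · rintro (rfl | ⟨k, hk, rfl⟩)
        · exact ⟨0, by simpa using hc, by simp⟩
        · exact ⟨k + 1, by simpa using hk, by push_cast; ring⟩
      · rintro ⟨k, hk, rfl⟩
        match k with
        | 0 => left; simp
        | k + 1 => right; exact ⟨k, by simpa using hk, by push_cast; ring⟩
    · rw [show occFrom (x :: xs) i c = occFrom xs (i + 1) c by simp [occFrom, hc]]
      rw [ih]
      constructor
      · rintro ⟨k, hk, rfl⟩
        exact ⟨k + 1, by simpa using hk, by push_cast; ring⟩
      · rintro ⟨k, hk, rfl⟩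
        match k with
        | 0 => simp at hk; exact absurd hk hc
        | k + 1 => exact ⟨k, by simpa using hk, by push_cast; ring⟩

theorem occFrom_ge (s : List Char) : ∀ (i : Int) (c : Char) (y : Int),
    y ∈ occFrom s i c → i ≤ y := by
  intro i c y hy
  obtain ⟨k, _, rfl⟩ := (mem_occFrom s i c y).mp hy
  omega

theorem occFrom_pairwise (s : List Char) : ∀ (i : Int) (c : Char),
    (occFrom s i c).Pairwise (· < ·) := by
  induction s with
  | nil => intro i c; simp [occFrom]
  | cons x xs ih =>
    intro i c
    by_cases hc : x = c
    · rw [show occFrom (x :: xs) i c = i :: occFrom xs (i + 1) c by simp [occFrom, hc]]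
      exact List.Pairwise.cons (fun y hy => by have := occFrom_ge xs (i + 1) c y hy; omega) (ih (i + 1) c)
    · rw [show occFrom (x :: xs) i c = occFrom xs (i + 1) c by simp [occFrom, hc]]
      exact ih (i + 1) c

theorem firstIdxFrom_some (s : List Char) (c : Char) : ∀ (n i j : Nat), s.length - i ≤ n →
    firstIdxFrom s i c = some j →
    i ≤ j ∧ s[j]? = some c ∧ ∀ k, i ≤ k → k < j → s[k]? ≠ some c := by
  intro n
  induction n with
  | zero =>
    intro i j hn hj
    rw [firstIdxFrom, dif_neg (by omega)] at hj
    exact absurd hj (by simp)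
  | succ n ihn =>
    intro i j hn hj
    rw [firstIdxFrom] at hj
    split at hj
    · next h =>
      split at hj
      · next he =>
        obtain rfl := Option.some.inj hj
        exact ⟨le_refl _, by rw [List.getElem?_eq_getElem h, he], fun k h1 h2 _ => by omega⟩
      · next he =>
        have := ihn (i + 1) j (by omega) hj
        refine ⟨by omega, this.2.1, fun k h1 h2 hk => ?_⟩
        rcases Nat.eq_or_lt_of_le h1 with rfl | h1'
        · rw [List.getElem?_eq_getElem h] at hk
          exact he (Option.some.inj hk)
        · exact this.2.2 k h1' h2 hk
    · exact absurd hj (by simp)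

theorem firstIdxFrom_none (s : List Char) (c : Char) : ∀ (n i : Nat), s.length - i ≤ n →
    firstIdxFrom s i c = none → ∀ k, i ≤ k → s[k]? ≠ some c := by
  intro n
  induction n with
  | zero =>
    intro i hn _ k hik hk
    have : s.length ≤ k := by omega
    rw [List.getElem?_eq_none this] at hk
    simp at hk
  | succ n ihn =>
    intro i hn hnone k hik hk
    rw [firstIdxFrom] at hnone
    split at hnone
    · next h =>
      split at hnone
      · exact absurd hnone (by simp)
      · next he =>
        rcases Nat.eq_or_lt_of_le hik with rfl | h1'
        · rw [List.getElem?_eq_getElem h] at hk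
          exact he (Option.some.inj hk)
        · exact ihn (i + 1) (by omega) hnone k h1' hk
    · next h =>
      have : s.length ≤ k := by omega
      rw [List.getElem?_eq_none this] at hk
      simp at hk

-- Source B's binary search returns the first position whose element is ≥ cur.
theorem bsearch_spec (lst : List Int) (cur : Int)
    (hs : lst.Pairwise (· < ·)) : ∀ (n lo hi : Nat), hi - lo ≤ n → lo ≤ hi → hi ≤ lst.length →
    (∀ m, m < lo → lst.getD m 0 < cur) →
    (∀ m, hi ≤ m → m < lst.length → ¬ lst.getD m 0 < cur) →
    (bsearch lst cur lo hi ≤ lst.length ∧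
     (∀ m, m < bsearch lst cur lo hi → lst.getD m 0 < cur) ∧
     (bsearch lst cur lo hi < lst.length → ¬ lst.getD (bsearch lst cur lo hi) 0 < cur)) := by
  intro n
  induction n with
  | zero =>
    intro lo hi hn hlohi hhi hlow hhigh
    have : lo = hi := by omega
    subst this
    rw [bsearch, if_neg (by omega)]
    exact ⟨by omega, hlow, fun h => hhigh lo (le_refl _) h⟩
  | succ n ihn =>
    intro lo hi hn hlohi hhi hlow hhigh
    rw [bsearch]
    split
    · next hlt =>
      have hmid : (lo + hi) / 2 < hi ∧ lo ≤ (lo + hi) / 2 := by omega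
      split
      · next hcmp =>
        refine ihn ((lo + hi) / 2 + 1) hi (by omega) (by omega) hhi ?_ hhigh
        intro m hm
        rcases Nat.lt_or_ge m ((lo + hi) / 2) with h | h
        · have hm1 : m < lst.length := by omega
          have hm2 : (lo + hi) / 2 < lst.length := by omega
          have := (List.pairwise_iff_getElem.mp hs) m ((lo + hi) / 2) hm1 hm2 h
          rw [List.getD_eq_getElem lst 0 hm1]
          rw [List.getD_eq_getElem lst 0 hm2] at hcmp
          omega
        · have : m = (lo + hi) / 2 := by omega
          subst this; exact hcmp
      · next hcmp =>
        refine ihn lo ((lo + hi) / 2) (by omega) (by omega) (by omega) hlow ?_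
        intro m hm1 hm2
        rcases Nat.eq_or_lt_of_le hm1 with rfl | h
        · exact hcmp
        · have hmid2 : (lo + hi) / 2 < lst.length := by omega
          have := (List.pairwise_iff_getElem.mp hs) ((lo + hi) / 2) m hmid2 hm2 h
          rw [List.getD_eq_getElem lst 0 hm2]
          rw [List.getD_eq_getElem lst 0 hmid2] at hcmp
          omega
    · next hge =>
      exact ⟨by omega, hlow, fun h => hhigh lo (by omega) h⟩

-- A's loop, one result-character at a time: scan for the next occurrence.
theorem scanA (s r : List Char) : ∀ (n ptrs ptrr : Nat), s.length - ptrs ≤ n →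
    ptrs ≤ s.length → ptrr < r.length →
    solutionLoop s r ptrs ptrr =
      (match firstIdxFrom s ptrs (r.getD ptrr default) with
       | none => (s.length, ptrr)
       | some j => solutionLoop s r (j + 1) (ptrr + 1)) := by
  intro n
  induction n with
  | zero =>
    intro ptrs ptrr hn hps hpr
    have hps' : ptrs = s.length := by omega
    subst hps'
    rw [solutionLoop, firstIdxFrom, dif_neg (by omega)]
    simp only [if_pos (Or.inr hpr), ge_iff_le, if_pos (le_refl _)]
  | succ n ihn =>
    intro ptrs ptrr hn hps hpr
    rw [solutionLoop, firstIdxFrom]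
    rcases Nat.lt_or_ge ptrs s.length with h | h
    · rw [dif_pos h]
      have hget : r.getD ptrr default = r[ptrr] := List.getD_eq_getElem r default hpr
      by_cases he : s[ptrs] = r.getD ptrr default
      · have he' : s[ptrs]? = r[ptrr]? := by
          rw [List.getElem?_eq_getElem h, List.getElem?_eq_getElem hpr, ← hget, he]
        simp only [if_pos he, if_pos (Or.inl h), ge_iff_le,
          if_neg (by omega : ¬ s.length ≤ ptrs), if_neg (by omega : ¬ r.length ≤ ptrr),
          if_pos he']
      · have he' : ¬ s[ptrs]? = r[ptrr]? := by
          rw [List.getElem?_eq_getElem h, List.getElem?_eq_getElem hpr, ← hget]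
          exact fun hh => he (Option.some.inj hh)
        simp only [if_neg he, if_pos (Or.inl h), ge_iff_le,
          if_neg (by omega : ¬ s.length ≤ ptrs), if_neg (by omega : ¬ r.length ≤ ptrr),
          if_neg he']
        exact ihn (ptrs + 1) ptrr (by omega) (by omega) hpr
    · have hps' : ptrs = s.length := by omega
      subst hps'
      rw [dif_neg (by omega)]
      simp only [if_pos (Or.inr hpr), ge_iff_le, if_pos (le_refl _)]

-- Binary search over the occurrence list finds exactly A's next scan position.
theorem bs_vs_scan (s : List Char) (ch : Char) (ptrs : Nat)
    (lst : List Int) (hlst : lst = occFrom s 0 ch) :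
    (bsearch lst (ptrs : Int) 0 lst.length = lst.length →
      firstIdxFrom s ptrs ch = none) ∧
    (bsearch lst (ptrs : Int) 0 lst.length < lst.length →
      ∃ j : Nat, firstIdxFrom s ptrs ch = some j ∧
        lst.getD (bsearch lst (ptrs : Int) 0 lst.length) 0 = (j : Int)) := by
  have hpw : lst.Pairwise (· < ·) := hlst ▸ occFrom_pairwise s 0 ch
  obtain ⟨hle, hlow, hhi⟩ := bsearch_spec lst (ptrs : Int) hpw lst.length 0 lst.length
    (by omega) (by omega) (le_refl _) (fun m h1 => by omega) (fun m h1 h2 => by omega)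
  set lo := bsearch lst (ptrs : Int) 0 lst.length with hlodef
  have hmem : ∀ y : Int, y ∈ lst ↔ ∃ k : Nat, s[k]? = some ch ∧ y = (k : Int) := by
    intro y
    rw [hlst, mem_occFrom]
    constructor
    · rintro ⟨k, hk, rfl⟩; exact ⟨k, hk, by omega⟩
    · rintro ⟨k, hk, rfl⟩; exact ⟨k, hk, by omega⟩
  constructor
  · intro heq
    cases hfi : firstIdxFrom s ptrs ch with
    | none => rfl
    | some j =>
      obtain ⟨hij, hsj, _⟩ := firstIdxFrom_some s ch s.length ptrs j (by omega) hfi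
      have hjmem : (j : Int) ∈ lst := (hmem _).mpr ⟨j, hsj, rfl⟩
      obtain ⟨m, hm, hmval⟩ := List.getElem_of_mem hjmem
      have := hlow m (by omega)
      rw [List.getD_eq_getElem lst 0 hm, hmval] at this
      omega
  · intro hlt
    have hmemlo : lst.getD lo 0 ∈ lst := by
      rw [List.getD_eq_getElem lst 0 hlt]; exact List.getElem_mem hlt
    obtain ⟨k, hsk, hkval⟩ := (hmem _).mp hmemlo
    have hkge : ptrs ≤ k := by
      have := hhi hlt; omega
    cases hfi : firstIdxFrom s ptrs ch with
    | none => exact absurd hsk (firstIdxFrom_none s ch s.length ptrs (by omega) hfi k hkge)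
    | some j =>
      obtain ⟨hij, hsj, hmin⟩ := firstIdxFrom_some s ch s.length ptrs j (by omega) hfi
      refine ⟨j, rfl, ?_⟩
      -- j ∈ lst at some index m ≥ lo, so lst[lo] ≤ j; minimality of j gives j ≤ k = lst[lo].
      have hjmem : (j : Int) ∈ lst := (hmem _).mpr ⟨j, hsj, rfl⟩
      obtain ⟨m, hm, hmval⟩ := List.getElem_of_mem hjmem
      have hmge : lo ≤ m := by
        by_contra hcon
        have := hlow m (by omega)
        rw [List.getD_eq_getElem lst 0 hm, hmval] at this
        omega
      have hjge : lst.getD lo 0 ≤ (j : Int) := by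
        rw [List.getD_eq_getElem lst 0 hlt, ← hmval]
        rcases Nat.eq_or_lt_of_le hmge with heq | hmlt
        · exact le_of_eq (by simp only [heq])
        · exact le_of_lt ((List.pairwise_iff_getElem.mp hpw) lo m hlt hm hmlt)
      have hkj : j ≤ k := by
        by_contra hcon
        exact hmin k hkge (by omega) hsk
      omega

-- The two loops in lockstep: B's (cur, matched) is A's (ptrs, ptrr).
theorem lockstep (s r : List Char) :
    ∀ (rs : List Char) (ptrs ptrr : Nat), rs = r.drop ptrr → ptrr ≤ r.length → ptrs ≤ s.length →
    altLoop (s.length : Int) (buildPos (PySem.List.enumerate s 0) PySem.Dict.empty)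
      rs (ptrs : Int) (ptrr : Int)
    = (((solutionLoop s r ptrs ptrr).1 : Int), ((solutionLoop s r ptrs ptrr).2 : Int)) := by
  intro rs
  induction rs with
  | nil =>
    intro ptrs ptrr hdrop hpr hps
    have hpr' : ptrr = r.length := by
      have := List.drop_eq_nil_iff.mp hdrop.symm; omega
    subst hpr'
    rw [solutionLoop, altLoop]
    rcases Nat.lt_or_ge ptrs s.length with h | h
    · simp only [if_pos (Or.inl h), ge_iff_le, if_neg (by omega : ¬ s.length ≤ ptrs),
        if_pos (le_refl _)]
    · simp only [if_neg (by omega : ¬ (ptrs < s.length ∨ r.length < r.length))]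
  | cons ch rs' ih =>
    intro ptrs ptrr hdrop hpr hps
    have hpr' : ptrr < r.length := by
      by_contra h
      rw [List.drop_eq_nil_iff.mpr (by omega)] at hdrop
      simp at hdrop
    have hcons : ch :: rs' = r[ptrr] :: r.drop (ptrr + 1) := by
      rw [hdrop, List.getElem_cons_drop (as := r) hpr']
    have hch : ch = r[ptrr] := (List.cons.injEq _ _ _ _ ▸ hcons).1
    have hrs' : rs' = r.drop (ptrr + 1) := (List.cons.injEq _ _ _ _ ▸ hcons).2
    rw [altLoop]
    have hposd : (buildPos (PySem.List.enumerate s 0) PySem.Dict.empty).getD ch [] = occFrom s 0 ch := by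
      rw [buildPos_getD]
      simp [PySem.Dict.empty, PySem.Dict.getD, PySem.Dict.get?]
    have hgetD : r.getD ptrr default = ch := by
      rw [List.getD_eq_getElem r default hpr', hch]
    rw [scanA s r s.length ptrs ptrr (by omega) hps hpr', hgetD]
    obtain ⟨hnone, hsome⟩ := bs_vs_scan s ch ptrs _ hposd
    simp only [hposd]
    simp only [hposd] at hnone hsome
    by_cases hcase : bsearch (occFrom s 0 ch) (ptrs : Int) 0 (occFrom s 0 ch).length
        = (occFrom s 0 ch).length
    · rw [if_pos hcase, hnone hcase]
    · rw [if_neg hcase]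
      have hlt : bsearch (occFrom s 0 ch) (ptrs : Int) 0 (occFrom s 0 ch).length
          < (occFrom s 0 ch).length := by
        have := (bsearch_spec (occFrom s 0 ch) (ptrs : Int) (occFrom_pairwise s 0 ch)
          (occFrom s 0 ch).length 0 (occFrom s 0 ch).length (by omega) (by omega) (le_refl _)
          (fun m h1 => by omega) (fun m h1 h2 => by omega)).1
        omega
      obtain ⟨j, hfi, hval⟩ := hsome hlt
      rw [hfi, hval]
      have hjlt : j < s.length := by
        have h2 := (firstIdxFrom_some s ch s.length ptrs j (by omega) hfi).2.1
        exact (List.getElem?_eq_some_iff.mp h2).choose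
      have hc1 : (j : Int) + 1 = ((j + 1 : Nat) : Int) := by push_cast; ring
      have hc2 : (ptrr : Int) + 1 = ((ptrr + 1 : Nat) : Int) := by push_cast; ring
      rw [hc1, hc2]
      exact ih (j + 1) (ptrr + 1) hrs' (by omega) (by omega)

-- ===== VERDICT =====
theorem solution_spec : Claim_equal_solution := by
  unfold Claim_equal_solution
  intro search result _
  unfold Spec_solution solution solution_alt
  have h := lockstep search.toList result.toList result.toList 0 0 (by simp) (by omega) (by omega)
  simp only [Nat.cast_zero] at h
  simp only [h]
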